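-- pv_equiv track=rewrite | github.com/diogoerie/Tp2DR1 | tp2/questao07.py | contar_pares
-- ===== SOURCE A (Python) =====
-- def contar_pares(pilha):
--     contagem = 0
--     pilha_temporaria = []
--     pares = []
--     while pilha:
--         pedido = pilha.pop()
--         pilha_temporaria.append(pedido)
--         if pedido % 2 == 0:
--             contagem += 1
--             pares.append(pedido)
--     while pilha_temporaria:
--         pilha.append(pilha_temporaria.pop())
--     return contagem, pares
-- ===== SOURCE B (Python) =====
-- def contar_pares(pilha):
--     pares = [x for x in reversed(pilha) if x % 2 == 0]
--     return len(pares), pares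
-- ===== Notes on version B (the rewrite author's own statement) =====
-- stated objective: simpler
-- what changed: Replaces the double pop/push stack simulation (mutating pilha and a temporary stack) with a single pure list comprehension over reversed(pilha), the count taken as len of that list.
import Mathlib
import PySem

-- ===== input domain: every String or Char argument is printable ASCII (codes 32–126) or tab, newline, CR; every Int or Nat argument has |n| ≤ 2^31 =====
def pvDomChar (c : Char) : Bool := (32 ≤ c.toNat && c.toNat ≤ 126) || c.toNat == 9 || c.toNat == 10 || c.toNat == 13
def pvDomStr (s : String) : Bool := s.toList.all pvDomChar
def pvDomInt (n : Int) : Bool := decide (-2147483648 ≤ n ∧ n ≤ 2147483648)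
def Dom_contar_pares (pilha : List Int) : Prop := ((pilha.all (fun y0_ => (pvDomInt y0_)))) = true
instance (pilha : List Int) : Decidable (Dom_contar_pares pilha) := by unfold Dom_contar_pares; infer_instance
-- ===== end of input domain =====

-- B replaces A's pop/push stack simulation by one pure filter over the reversed list (objective: simpler).
-- A temporarily mutates pilha but restores it before returning, so the equivalence about the return value
-- carries no observable side-effect difference.

-- ===== PORT A =====
-- first while loop of A: state (pilha, pilha_temporaria, pares, contagem); pop = take last element.
def contarParesLoopA (pilha temp pares : List Int) (contagem : Int) : Int × List Int :=
  match h : pilha.getLast? with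
  | none => (contagem, pares)          -- pilha empty: loop ends (second loop only restores pilha)
  | some pedido =>
      if pedido % 2 == 0 then
        contarParesLoopA pilha.dropLast (temp ++ [pedido]) (pares ++ [pedido]) (contagem + 1)
      else
        contarParesLoopA pilha.dropLast (temp ++ [pedido]) pares contagem
termination_by pilha.length
decreasing_by
  all_goals
    have hne : pilha ≠ [] := by intro hnil; simp [hnil] at h
    have hpos : 0 < pilha.length := List.length_pos_iff.mpr hne
    simp [List.length_dropLast]
    omega

def contar_pares (pilha : List Int) : Int × List Int :=
  contarParesLoopA pilha [] [] 0

-- ===== PORT B =====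
def contar_pares_alt (pilha : List Int) : Int × List Int :=
  let pares := pilha.reverse.filter (fun x => x % 2 == 0)
  ((pares.length : Int), pares)

-- ===== PRECONDITION & SPEC =====
def Spec_contar_pares (pilha : List Int) (out : Int × List Int) : Prop := out = contar_pares_alt pilha
instance (pilha : List Int) (out : Int × List Int) : Decidable (Spec_contar_pares pilha out) := by unfold Spec_contar_pares; infer_instance

-- ===== CLAIM (what is proved, stated in full; the proofs are below) =====
def Claim_equal_contar_pares : Prop := ∀ (pilha : List Int), Dom_contar_pares pilha → Spec_contar_pares pilha (contar_pares pilha)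

-- ===== LEMMAS AND PROOFS =====

theorem contarParesLoopA_eq (pilha : List Int) : ∀ (temp pares : List Int) (contagem : Int),
    contarParesLoopA pilha temp pares contagem =
      (contagem + ((pilha.reverse.filter (fun x => x % 2 == 0)).length : Int),
       pares ++ pilha.reverse.filter (fun x => x % 2 == 0)) := by
  induction pilha using List.reverseRecOn with
  | nil => intro temp pares contagem; simp [contarParesLoopA]
  | append_singleton xs x ih =>
      intro temp pares contagem
      rw [contarParesLoopA]
      split
      next h => simp at h
      next pedido h =>
        have hc : (xs ++ [x]).getLast? = some x := List.getLast?_concat ..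
        rw [hc] at h
        obtain rfl : pedido = x := (Option.some.inj h).symm
        simp only [List.dropLast_concat, List.reverse_append, List.reverse_singleton,
          List.singleton_append, List.filter_cons, ih]
        by_cases hx2 : (pedido % 2 == 0) = true
        · simp only [hx2, if_true, List.length_cons]
          refine Prod.ext ?_ (by simp)
          push_cast; ring
        · simp [hx2]

-- ===== VERDICT (by name: the statement is the Claim_ definition above) =====
theorem contar_pares_spec : Claim_equal_contar_pares := by
  intro pilha _
  unfold Spec_contar_pares contar_pares contar_pares_alt
  simp [contarParesLoopA_eq]
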